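-- pv_equiv track=rewrite | github.com/alexxx-db/dbx-unifiedchat | agent_app/agent_server/multi_agent/agents/chart_generator.py | _pick_categorical_field
-- ===== SOURCE A (Python) =====
-- from typing import Any, Dict, Iterable, List, Optional, Sequence, Tuple
--
-- def _pick_categorical_field(columns: Sequence[str], kinds: Dict[str, str]) -> Optional[str]:
--     for column in columns:
--         if kinds.get(column) == "text":
--             return column
--     for column in columns:
--         if kinds.get(column) == "date":
--             return column
--     return None
-- ===== SOURCE B (Python) =====
-- def _pick_categorical_field(columns, kinds):
--     first_date = None
--     for column in columns:
--         kind = kinds.get(column)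
--         if kind == "text":
--             return column
--         if kind == "date" and first_date is None:
--             first_date = column
--     return first_date
-- ===== Notes on version B (the rewrite author's own statement) =====
-- stated objective: simpler
-- what changed: Replaces A's two sequential scans (text scan, then a restarted date scan) with one pass that returns a text column immediately and records only the first date column as a fallback.
import Mathlib
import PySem

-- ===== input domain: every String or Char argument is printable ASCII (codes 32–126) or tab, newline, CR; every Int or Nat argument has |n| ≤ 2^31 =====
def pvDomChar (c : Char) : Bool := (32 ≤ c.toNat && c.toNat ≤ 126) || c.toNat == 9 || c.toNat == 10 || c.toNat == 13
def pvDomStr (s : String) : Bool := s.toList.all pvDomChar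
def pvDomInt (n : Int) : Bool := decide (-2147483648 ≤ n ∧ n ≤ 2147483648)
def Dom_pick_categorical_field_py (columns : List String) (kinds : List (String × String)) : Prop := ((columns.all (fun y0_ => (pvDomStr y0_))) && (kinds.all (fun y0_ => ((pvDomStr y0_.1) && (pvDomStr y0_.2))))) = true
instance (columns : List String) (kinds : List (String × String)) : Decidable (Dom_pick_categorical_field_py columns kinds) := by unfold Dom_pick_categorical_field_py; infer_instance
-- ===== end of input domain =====

-- B is a single pass that returns a text column at once and keeps the first date column as a fallback,
-- instead of A's two sequential scans; same result, one traversal.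

-- ===== PORT A =====
-- first loop: return the first column whose kind is "text"
def pvAScanText (kinds : List (String × String)) : List String → Option String
  | [] => none
  | c :: rest =>
    if (PySem.Dict.mk kinds).get? c = some "text" then some c else pvAScanText kinds rest

-- second loop: return the first column whose kind is "date"
def pvAScanDate (kinds : List (String × String)) : List String → Option String
  | [] => none
  | c :: rest =>
    if (PySem.Dict.mk kinds).get? c = some "date" then some c else pvAScanDate kinds rest

def pick_categorical_field_py (columns : List String) (kinds : List (String × String)) : Option String :=
  match pvAScanText kinds columns with
  | some c => some c
  | none => pvAScanDate kinds columns

-- ===== PORT B =====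
-- single pass carrying first_date
def pvBGo (kinds : List (String × String)) (firstDate : Option String) : List String → Option String
  | [] => firstDate
  | c :: rest =>
    let kind := (PySem.Dict.mk kinds).get? c
    if kind = some "text" then some c
    else if kind = some "date" ∧ firstDate = none then pvBGo kinds (some c) rest
    else pvBGo kinds firstDate rest

def pick_categorical_field_py_alt (columns : List String) (kinds : List (String × String)) : Option String :=
  pvBGo kinds none columns

-- ===== PRECONDITION & SPEC =====
def Spec_pick_categorical_field_py (columns : List String) (kinds : List (String × String)) (out : Option String) : Prop := out = pick_categorical_field_py_alt columns kinds
instance (columns : List String) (kinds : List (String × String)) (out : Option String) : Decidable (Spec_pick_categorical_field_py columns kinds out) := by unfold Spec_pick_categorical_field_py; infer_instance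

-- ===== CLAIM (what is proved, stated in full; the proofs are below) =====
def Claim_equal_pick_categorical_field_py : Prop := ∀ (columns : List String) (kinds : List (String × String)), Dom_pick_categorical_field_py columns kinds → Spec_pick_categorical_field_py columns kinds (pick_categorical_field_py columns kinds)

-- ===== LEMMAS AND PROOFS =====

-- B's loop equals: first text wins; otherwise the carried firstDate; otherwise the first date in the rest.
theorem pvBGo_eq (kinds : List (String × String)) (fd : Option String) (cols : List String) :
    pvBGo kinds fd cols =
      match pvAScanText kinds cols with
      | some c => some c
      | none => match fd with
        | some d => some d
        | none => pvAScanDate kinds cols := by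
  induction cols generalizing fd with
  | nil => cases fd <;> simp [pvBGo, pvAScanText, pvAScanDate]
  | cons c rest ih =>
    simp only [pvBGo, pvAScanText, pvAScanDate]
    by_cases ht : (PySem.Dict.mk kinds).get? c = some "text"
    · simp [ht]
    · by_cases hd : (PySem.Dict.mk kinds).get? c = some "date"
      · cases fd with
        | none => simp [ht, hd, ih]
        | some d => simp [ht, hd, ih]
      · cases fd with
        | none => simp [ht, hd, ih]
        | some d => simp [ht, hd, ih]

-- ===== VERDICT (by name: the statement is the Claim_ definition above) =====
theorem pick_categorical_field_py_spec : Claim_equal_pick_categorical_field_py := by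
  intro columns kinds _
  unfold Spec_pick_categorical_field_py pick_categorical_field_py pick_categorical_field_py_alt
  rw [pvBGo_eq]
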